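-- pv_equiv track=rewrite | github.com/arifmudi/PBO2024A | david ibnu harris - 2355201008/Konoha_encripe.py | decryptEligma
-- ===== SOURCE A (Python) =====
-- def decryptEligma(x):
--     total_shift = 0
--     decryptPesan = []
--
--     for char in x:
--         if char.isdigit():
--             total_shift += int(char)
--         elif char.isalpha():
--             decryptPesan.append(char)
--
--
--     for i in range(len(decryptPesan)):
--         original_char = decryptPesan[i]
--
--         if original_char.islower():
--             shifted_char = chr((ord(original_char) - ord('a') + total_shift) % 26 + ord('a'))
--         else:
--             shifted_char = chr((ord(original_char) - ord('A') + total_shift) % 26 + ord('A'))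
--
--         decryptPesan[i] = shifted_char
--
--
--     return ''.join(decryptPesan)
-- ===== SOURCE B (Python) =====
-- def decryptEligma(x):
--     total_shift = sum(int(c) for c in x if c.isdigit())
--     letters = [c for c in x if c.isalpha()]
--     s = total_shift % 26
--     lower = 'abcdefghijklmnopqrstuvwxyz'
--     upper = lower.upper()
--     table = str.maketrans(lower + upper,
--                           lower[s:] + lower[:s] + upper[s:] + upper[:s])
--     return ''.join(letters).translate(table)
-- ===== Notes on version B (the rewrite author's own statement) =====
-- stated objective: idiomatic
-- what changed: Replaces the two explicit loops with per-character ord/%26 arithmetic by comprehensions plus a precomputed rotation table (str.maketrans of the 26-shift-rotated alphabets) applied in one str.translate pass.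
import Mathlib
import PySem

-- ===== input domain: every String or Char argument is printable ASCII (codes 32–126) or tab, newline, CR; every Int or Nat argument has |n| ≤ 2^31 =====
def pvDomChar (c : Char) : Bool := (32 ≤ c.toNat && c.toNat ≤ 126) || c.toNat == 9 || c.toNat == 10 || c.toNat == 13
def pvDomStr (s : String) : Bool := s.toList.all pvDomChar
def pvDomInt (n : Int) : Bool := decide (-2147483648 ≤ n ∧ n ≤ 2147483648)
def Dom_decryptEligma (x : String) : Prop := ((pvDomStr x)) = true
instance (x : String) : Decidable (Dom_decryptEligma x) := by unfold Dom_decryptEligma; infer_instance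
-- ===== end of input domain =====

-- B replaces the per-character ord/%26 arithmetic loops by filters plus a precomputed
-- rotation table (maketrans of the shift-rotated alphabets) applied in one translate pass (idiomatic).


-- ===== PORT A =====
-- first loop: accumulate (total_shift, decryptPesan); int(char) on a digit char is its code - 48 (exact)
def decryptEligmaLoop1 (st : Int × List Char) (c : Char) : Int × List Char :=
  if PySem.Chars.isdigit c then (st.1 + ((c.toNat : Int) - 48), st.2)
  else if PySem.Chars.isalpha c then (st.1, st.2 ++ [c])
  else st

-- second loop rewrites each cell decryptPesan[i] from decryptPesan[i] alone: a positional map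
def decryptEligmaShift (total : Int) (c : Char) : Char :=
  if PySem.Chars.islower c then
    Char.ofNat ((PySem.Int.mod ((c.toNat : Int) - 97 + total) 26).toNat + 97)
  else
    Char.ofNat ((PySem.Int.mod ((c.toNat : Int) - 65 + total) 26).toNat + 65)

def decryptEligma (x : String) : String :=
  let st := x.toList.foldl decryptEligmaLoop1 (0, [])
  String.mk (st.2.map (decryptEligmaShift st.1))

-- ===== PORT B =====
-- str.maketrans(lower+upper, rot_lower+rot_upper) as an insertion-ordered dict
def pyRotTable (s : Nat) : PySem.Dict Char Char :=
  let lower := "abcdefghijklmnopqrstuvwxyz".toList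
  let upper := "ABCDEFGHIJKLMNOPQRSTUVWXYZ".toList
  ((lower ++ upper).zip ((lower.drop s ++ lower.take s) ++ (upper.drop s ++ upper.take s))).foldl
    (fun d p => d.insert p.1 p.2) PySem.Dict.empty

def decryptEligma_alt (x : String) : String :=
  let total := ((x.toList.filter PySem.Chars.isdigit).map (fun c => (c.toNat : Int) - 48)).foldl (· + ·) 0
  let letters := x.toList.filter PySem.Chars.isalpha
  let s := (PySem.Int.mod total 26).toNat
  let table := pyRotTable s
  -- translate: chars absent from the table pass through unchanged
  String.mk (letters.map (fun c => table.getD c c))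

-- ===== PRECONDITION & SPEC =====
def Spec_decryptEligma (x : String) (out : String) : Prop := out = decryptEligma_alt x
instance (x : String) (out : String) : Decidable (Spec_decryptEligma x out) := by unfold Spec_decryptEligma; infer_instance

-- ===== CLAIM (what is proved, stated in full; the proofs are below) =====
def Claim_equal_decryptEligma : Prop := ∀ (x : String), Dom_decryptEligma x → Spec_decryptEligma x (decryptEligma x)

-- ===== LEMMAS AND PROOFS =====

-- ASCII digits are never letters, so A's elif-filter is the plain isalpha filter
theorem not_alpha_of_digit (c : Char) (h : PySem.Chars.isdigit c = true) :
    PySem.Chars.isalpha c = false := by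
  simp [PySem.Chars.isdigit, PySem.Chars.isalpha, PySem.Chars.isupper, PySem.Chars.islower,
    Char.le_def, UInt32.le_iff_toNat_le] at *
  omega

theorem foldl_add_shift (l : List Int) (a : Int) :
    l.foldl (· + ·) a = a + l.foldl (· + ·) 0 := by
  induction l generalizing a with
  | nil => simp
  | cons x l ih => simp only [List.foldl_cons]; rw [ih (a+x), ih (0+x)]; ring

-- A's interleaved first loop computes the digit sum and the isalpha filter
theorem loop1_char (cs : List Char) (t : Int) (acc : List Char) :
    cs.foldl decryptEligmaLoop1 (t, acc) =
      (t + ((cs.filter PySem.Chars.isdigit).map (fun c => (c.toNat : Int) - 48)).foldl (· + ·) 0,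
       acc ++ cs.filter PySem.Chars.isalpha) := by
  induction cs generalizing t acc with
  | nil => simp
  | cons c cs ih =>
    by_cases hd : PySem.Chars.isdigit c = true
    · have ha := not_alpha_of_digit c hd
      simp [decryptEligmaLoop1, hd, ha, ih]
      rw [foldl_add_shift ((List.filter PySem.Chars.isdigit cs).map (fun c => (c.toNat:Int) - 48)) ((c.toNat:Int)-48)]
      ring
    · by_cases hal : PySem.Chars.isalpha c = true
      · simp [decryptEligmaLoop1, hd, hal, ih]
      · simp [decryptEligmaLoop1, hd, hal, ih]

-- the rotation table, on each of the 52 letters, realises the (+s) % 26 rotation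
set_option maxHeartbeats 4000000 in
set_option maxRecDepth 10000 in
theorem table_lookup (s : Nat) (hs : s < 26) (a : Nat) (ha : a < 26) :
    (pyRotTable s).getD (Char.ofNat (97+a)) (Char.ofNat (97+a)) = Char.ofNat (97 + (a+s)%26) ∧
    (pyRotTable s).getD (Char.ofNat (65+a)) (Char.ofNat (65+a)) = Char.ofNat (65 + (a+s)%26) := by
  revert a hs
  revert s
  decide

-- A's per-character shift equals B's table lookup on every letter
theorem shift_eq_table (total : Int) (c : Char) (h : PySem.Chars.isalpha c = true) :
    decryptEligmaShift total c =
      (pyRotTable (PySem.Int.mod total 26).toNat).getD c c := by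
  have hmod : PySem.Int.mod total 26 = total % 26 := PySem.Int.mod_eq_emod_of_pos (by norm_num)
  set s : Nat := (PySem.Int.mod total 26).toNat with hsdef
  have hs26 : s < 26 := by
    have h1 : total % 26 < 26 := Int.emod_lt_of_pos _ (by norm_num)
    have h2 : 0 ≤ total % 26 := Int.emod_nonneg _ (by norm_num)
    omega
  have hcast : (s : Int) = total % 26 := by
    have h2 : 0 ≤ total % 26 := Int.emod_nonneg _ (by norm_num)
    omega
  have key97 : ∀ k : Nat, ((PySem.Int.mod ((k : Int) - 97 + total) 26).toNat + 97) = 97 + ((k - 97) + s) % 26 ∨ k < 97 := by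
    intro k
    rw [PySem.Int.mod_eq_emod_of_pos (by norm_num)]
    omega
  have key65 : ∀ k : Nat, ((PySem.Int.mod ((k : Int) - 65 + total) 26).toNat + 65) = 65 + ((k - 65) + s) % 26 ∨ k < 65 := by
    intro k
    rw [PySem.Int.mod_eq_emod_of_pos (by norm_num)]
    omega
  -- c's code is in the letter ranges
  have halpha : (97 ≤ c.toNat ∧ c.toNat ≤ 122) ∨ (65 ≤ c.toNat ∧ c.toNat ≤ 90) := by
    simp [PySem.Chars.isalpha, PySem.Chars.isupper, PySem.Chars.islower, Char.le_def,
      UInt32.le_iff_toNat_le] at h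
    rcases h with h | h
    · right; exact ⟨h.1, h.2⟩
    · left; exact ⟨h.1, h.2⟩
  have hofNat : Char.ofNat c.toNat = c := Char.ofNat_toNat c
  rcases halpha with ⟨h1, h2⟩ | ⟨h1, h2⟩
  · have hlow : PySem.Chars.islower c = true := by
      simp [PySem.Chars.islower, Char.le_def, UInt32.le_iff_toNat_le]
      constructor <;> [skip; skip] <;> omega
    rw [decryptEligmaShift, if_pos hlow, (key97 c.toNat).resolve_right (by omega)]
    have ha : c.toNat - 97 < 26 := by omega
    have := (table_lookup s hs26 (c.toNat - 97) ha).1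
    rw [show 97 + (c.toNat - 97) = c.toNat by omega, hofNat] at this
    exact this.symm
  · have hlow : PySem.Chars.islower c = false := by
      simp [PySem.Chars.islower, Char.le_def, UInt32.le_iff_toNat_le]
      omega
    rw [decryptEligmaShift, if_neg (by simp [hlow]), (key65 c.toNat).resolve_right (by omega)]
    have ha : c.toNat - 65 < 26 := by omega
    have := (table_lookup s hs26 (c.toNat - 65) ha).2
    rw [show 65 + (c.toNat - 65) = c.toNat by omega, hofNat] at this
    exact this.symm

-- ===== VERDICT (by name: the statement is the Claim_ definition above) =====
theorem decryptEligma_spec : Claim_equal_decryptEligma := by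
  intro x _
  show decryptEligma x = decryptEligma_alt x
  simp only [decryptEligma, decryptEligma_alt, loop1_char, List.nil_append]
  rw [zero_add]
  exact congrArg String.mk (List.map_congr_left (fun c hc => shift_eq_table _ c (List.of_mem_filter hc)))
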